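-- pv_equiv track=rewrite | github.com/casabikk/ai_mood_sibur | vk_comments_loading.py | user_and_likes
-- ===== SOURCE A (Python) =====
-- def user_and_likes(all_ids, list_of_liked):
--     user_likes = {}
--     for j in all_ids:
--         user_likes[j] = 0
--     for i in list_of_liked:
--         for l in i:
--             for k in all_ids:
--                 if(l == k):
--                     user_likes[k] += 1
--     return user_likes
-- ===== SOURCE B (Python) =====
-- def user_and_likes(all_ids, list_of_liked):
--     counts = {}
--     for group in list_of_liked:
--         for x in group:
--             counts[x] = counts.get(x, 0) + 1
--     user_likes = dict.fromkeys(all_ids, 0)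
--     for j in all_ids:
--         user_likes[j] += counts.get(j, 0)
--     return user_likes
-- ===== Notes on version B (the rewrite author's own statement) =====
-- stated objective: faster
-- what changed: B counts the flattened liked lists once into a dict and then does one accumulation pass over all_ids, instead of A's rescan of all_ids for every nested element.
import Mathlib
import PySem

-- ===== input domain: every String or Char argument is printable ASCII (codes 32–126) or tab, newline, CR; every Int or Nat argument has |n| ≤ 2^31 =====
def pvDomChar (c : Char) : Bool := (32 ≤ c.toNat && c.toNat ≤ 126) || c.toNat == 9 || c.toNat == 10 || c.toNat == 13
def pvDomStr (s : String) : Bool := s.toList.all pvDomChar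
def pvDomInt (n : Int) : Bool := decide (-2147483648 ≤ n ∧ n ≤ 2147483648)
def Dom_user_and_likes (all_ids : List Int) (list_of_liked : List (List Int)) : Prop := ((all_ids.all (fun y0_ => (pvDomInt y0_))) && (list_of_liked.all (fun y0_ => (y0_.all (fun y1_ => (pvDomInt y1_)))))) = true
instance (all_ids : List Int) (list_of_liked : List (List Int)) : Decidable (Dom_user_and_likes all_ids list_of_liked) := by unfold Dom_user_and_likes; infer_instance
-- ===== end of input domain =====

-- B counts the flattened liked lists once into a dict, then accumulates in one pass over all_ids,
-- replacing A's rescan of all_ids for every nested element (faster in a timing run).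

-- ===== PORT A =====
-- 'user_likes[k] += 1' is ported as modify k 0 (· + 1): exact here, because it only runs when
-- l == k with k drawn from all_ids, and every element of all_ids was inserted as a key first,
-- so the key is always present and the default 0 is never used (no KeyError is reachable).
def user_and_likes (all_ids : List Int) (list_of_liked : List (List Int)) : List (Int × Int) :=
  let user_likes : PySem.Dict Int Int := all_ids.foldl (fun d j => d.insert j 0) PySem.Dict.empty
  let user_likes := list_of_liked.foldl (fun d i =>
    i.foldl (fun d l =>
      all_ids.foldl (fun d k => if l == k then d.modify k 0 (· + 1) else d) d) d) user_likes
  user_likes.items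

-- ===== PORT B =====
-- 'user_likes[j] += counts.get(j, 0)' is ported as modify j 0 (· + counts.getD j 0): exact,
-- since fromkeys made every j ∈ all_ids a key, so the default 0 is never used (no KeyError).
def user_and_likes_alt (all_ids : List Int) (list_of_liked : List (List Int)) : List (Int × Int) :=
  let counts : PySem.Dict Int Int := list_of_liked.foldl (fun d group =>
    group.foldl (fun d x => d.insert x (d.getD x 0 + 1)) d) PySem.Dict.empty
  let user_likes : PySem.Dict Int Int := all_ids.foldl (fun d j => d.insert j 0) PySem.Dict.empty
  let user_likes := all_ids.foldl (fun d j => d.modify j 0 (· + counts.getD j 0)) user_likes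
  user_likes.items

-- ===== PRECONDITION & SPEC =====
def Spec_user_and_likes (all_ids : List Int) (list_of_liked : List (List Int)) (out : List (Int × Int)) : Prop := out = user_and_likes_alt all_ids list_of_liked
instance (all_ids : List Int) (list_of_liked : List (List Int)) (out : List (Int × Int)) : Decidable (Spec_user_and_likes all_ids list_of_liked out) := by unfold Spec_user_and_likes; infer_instance

-- ===== CLAIM (what is proved, stated in full; the proofs are below) =====
def Claim_equal_user_and_likes : Prop := ∀ (all_ids : List Int) (list_of_liked : List (List Int)), Dom_user_and_likes all_ids list_of_liked → Spec_user_and_likes all_ids list_of_liked (user_and_likes all_ids list_of_liked)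

-- ===== LEMMAS AND PROOFS =====

-- The shared initialisation loop: every key of all_ids holds 0, anything else keeps its old value.
theorem getD_init (all_ids : List Int) (d : PySem.Dict Int Int) (v : Int) :
    (all_ids.foldl (fun d j => d.insert j 0) d).getD v 0 = if v ∈ all_ids then 0 else d.getD v 0 := by
  induction all_ids generalizing d with
  | nil => simp
  | cons j js ih =>
    simp only [List.foldl_cons, ih, List.mem_cons]
    rcases Decidable.em (v ∈ js) with h | h
    · simp [h]
    · simp [h, PySem.Dict.getD_insert]

-- A's inner loop over all_ids: adds all_ids.count l to the entry at l, nothing else.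
theorem getD_inner (all_ids : List Int) (l : Int) (d : PySem.Dict Int Int) (v : Int) :
    (all_ids.foldl (fun d k => if l == k then d.modify k 0 (· + 1) else d) d).getD v 0
      = d.getD v 0 + if v = l then (all_ids.count l : Int) else 0 := by
  induction all_ids generalizing d with
  | nil => simp
  | cons k ks ih =>
    simp only [List.foldl_cons, ih, List.count_cons]
    by_cases hlk : l = k
    · subst hlk
      simp only [BEq.rfl, if_true, PySem.Dict.getD_modify]
      by_cases hv : v = l <;> simp [hv] <;> ring
    · have hb : (l == k) = false := by simp [hlk]
      simp only [hb, Bool.false_eq_true, if_false]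
      by_cases hv : v = l
      · subst hv
        have : (k == v) = false := by simp only [beq_eq_false_iff_ne]; exact Ne.symm hlk
        simp [this]
      · simp [hv]

-- A's counting loop over the flattened list: adds count(flat, v) * count(all_ids, v).
theorem getD_flatloop (flat : List Int) (all_ids : List Int) (d : PySem.Dict Int Int) (v : Int) :
    (flat.foldl (fun d l => all_ids.foldl (fun d k => if l == k then d.modify k 0 (· + 1) else d) d) d).getD v 0
      = d.getD v 0 + (flat.count v : Int) * (all_ids.count v : Int) := by
  induction flat generalizing d with
  | nil => simp
  | cons l ls ih =>
    simp only [List.foldl_cons, ih, getD_inner, List.count_cons]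
    by_cases hv : v = l
    · subst hv; simp; ring
    · have : (l == v) = false := by simp only [beq_eq_false_iff_ne]; exact fun h => hv h.symm
      simp [hv, this]

-- Keys of A's counting loops never change: modify only hits keys already present.
theorem keys_inner (all_ids : List Int) (l : Int) (d : PySem.Dict Int Int)
    (h : ∀ x ∈ all_ids, x ∈ d.keys) :
    (all_ids.foldl (fun d k => if l == k then d.modify k 0 (· + 1) else d) d).keys = d.keys := by
  induction all_ids generalizing d with
  | nil => rfl
  | cons k ks ih =>
    simp only [List.foldl_cons]
    by_cases hlk : (l == k) = true
    · simp only [hlk, if_true]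
      have hk : d.contains k := by
        rw [PySem.Dict.contains_iff_mem_keys]; exact h k (List.mem_cons_self ..)
      have hkeys : (d.modify k 0 (· + 1)).keys = d.keys := by
        rw [PySem.Dict.keys_modify]; exact PySem.Dict.keys_insert_of_contains _ _ hk
      rw [ih _ (fun x hx => by rw [hkeys]; exact h x (List.mem_cons_of_mem _ hx)), hkeys]
    · simp only [Bool.not_eq_true] at hlk
      simp only [hlk, Bool.false_eq_true, if_false]
      exact ih _ (fun x hx => h x (List.mem_cons_of_mem _ hx))

theorem keys_flatloop (flat : List Int) (all_ids : List Int) (d : PySem.Dict Int Int)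
    (h : ∀ x ∈ all_ids, x ∈ d.keys) :
    (flat.foldl (fun d l => all_ids.foldl (fun d k => if l == k then d.modify k 0 (· + 1) else d) d) d).keys = d.keys := by
  induction flat generalizing d with
  | nil => rfl
  | cons l ls ih =>
    simp only [List.foldl_cons]
    rw [ih _ (fun x hx => by rw [keys_inner _ _ _ h]; exact h x hx), keys_inner _ _ _ h]

theorem keys_init (all_ids : List Int) :
    (all_ids.foldl (fun d j => d.insert j 0) (PySem.Dict.empty : PySem.Dict Int Int)).keys
      = PySem.Set.ofList all_ids := by
  rw [PySem.Dict.keys_foldl_insert]; simp [PySem.Set.update_nil_left]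

-- B's accumulation loop: each occurrence of v in xs adds c v to the entry at v.
theorem getD_accloop (xs : List Int) (c : Int → Int) (d : PySem.Dict Int Int) (v : Int) :
    (xs.foldl (fun d j => d.modify j 0 (· + c j)) d).getD v 0
      = d.getD v 0 + (xs.count v : Int) * c v := by
  induction xs generalizing d with
  | nil => simp
  | cons j js ih =>
    simp only [List.foldl_cons, ih, PySem.Dict.getD_modify, List.count_cons]
    by_cases hv : v = j
    · subst hv; simp; ring
    · have : (j == v) = false := by simp only [beq_eq_false_iff_ne]; exact Ne.symm hv
      simp [hv, this]

-- B's accumulation loop leaves the key list unchanged: every j is already a key.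
theorem keys_accloop (xs : List Int) (c : Int → Int) (d : PySem.Dict Int Int)
    (h : ∀ x ∈ xs, x ∈ d.keys) :
    (xs.foldl (fun d j => d.modify j 0 (· + c j)) d).keys = d.keys := by
  induction xs generalizing d with
  | nil => rfl
  | cons j js ih =>
    simp only [List.foldl_cons]
    have hk : d.contains j := by
      rw [PySem.Dict.contains_iff_mem_keys]; exact h j (List.mem_cons_self ..)
    have hkeys : (d.modify j 0 (· + c j)).keys = d.keys := by
      rw [PySem.Dict.keys_modify]; exact PySem.Dict.keys_insert_of_contains _ _ hk
    rw [ih _ (fun x hx => by rw [hkeys]; exact h x (List.mem_cons_of_mem _ hx)), hkeys]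

-- Both ports return, in first-occurrence order of all_ids, each id paired with
-- count(flattened liked, id) * count(all_ids, id).
theorem A_char (all_ids : List Int) (list_of_liked : List (List Int)) :
    user_and_likes all_ids list_of_liked
      = (PySem.Set.ofList all_ids).map
          (fun k => (k, (list_of_liked.flatten.count k : Int) * (all_ids.count k : Int))) := by
  unfold user_and_likes
  simp only
  rw [← List.foldl_flatten]
  have hkeys := keys_flatloop list_of_liked.flatten all_ids
    (all_ids.foldl (fun d j => d.insert j 0) (PySem.Dict.empty : PySem.Dict Int Int))
    (fun x hx => by rw [keys_init, PySem.Set.mem_ofList]; exact hx)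
  rw [keys_init] at hkeys
  rw [PySem.Dict.items_eq_map_keys _ (by rw [hkeys]; exact PySem.Set.nodup_ofList _) 0, hkeys]
  refine List.map_congr_left fun k hk => ?_
  rw [PySem.Set.mem_ofList] at hk
  rw [getD_flatloop, getD_init]
  simp [hk]

theorem B_char (all_ids : List Int) (list_of_liked : List (List Int)) :
    user_and_likes_alt all_ids list_of_liked
      = (PySem.Set.ofList all_ids).map
          (fun k => (k, (list_of_liked.flatten.count k : Int) * (all_ids.count k : Int))) := by
  unfold user_and_likes_alt
  simp only
  rw [← List.foldl_flatten, PySem.Dict.foldl_insert_getD_add_one_eq_counter]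
  have hkeys := keys_accloop all_ids
    (fun j => (PySem.Dict.counter list_of_liked.flatten).getD j 0)
    (all_ids.foldl (fun d j => d.insert j 0) (PySem.Dict.empty : PySem.Dict Int Int))
    (fun x hx => by rw [keys_init, PySem.Set.mem_ofList]; exact hx)
  rw [keys_init] at hkeys
  rw [PySem.Dict.items_eq_map_keys _ (by rw [hkeys]; exact PySem.Set.nodup_ofList _) 0, hkeys]
  refine List.map_congr_left fun k hk => ?_
  rw [PySem.Set.mem_ofList] at hk
  rw [getD_accloop, getD_init]
  simp [hk, PySem.Dict.getD_counter]
  ring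

-- ===== VERDICT (by name: the statement is the Claim_ definition above) =====
theorem user_and_likes_spec : Claim_equal_user_and_likes := by
  intro all_ids list_of_liked _
  unfold Spec_user_and_likes
  rw [A_char, B_char]
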